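-- pv_equiv track=rewrite | github.com/RooTinfinite/leetcode-solutions | solutions/2691-count-vowel-strings-in-ranges/count-vowel-strings-in-ranges.py | vowelStrings
-- ===== SOURCE A (Python) =====
-- def vowelStrings(words, queries):
--     prefix = [0]
--     sum_ = 0
--     for word in words:
--         if word[0] in 'aeiou' and word[-1] in 'aeiou':
--             sum_ += 1
--         prefix.append(sum_)
--     res = []
--     for l, r in queries:
--         res.append(prefix[r + 1] - prefix[l])
--     return res
-- ===== SOURCE B (Python) =====
-- def vowelStrings(words, queries):
--     vowels = 'aeiou'
--     mask = [1 if w[0] in vowels and w[-1] in vowels else 0 for w in words]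
--     pre = [sum(mask[:k]) for k in range(len(words) + 1)]
--     return [pre[r + 1] - pre[l] for l, r in queries]
-- ===== Notes on version B (the rewrite author's own statement) =====
-- stated objective: alternative
-- what changed: B drops A's running-sum accumulator loop: it builds a 0/1 mask once and derives each prefix entry independently by summing the slice mask[:k] in a comprehension, then answers queries from that table by comprehension.
import Mathlib
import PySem

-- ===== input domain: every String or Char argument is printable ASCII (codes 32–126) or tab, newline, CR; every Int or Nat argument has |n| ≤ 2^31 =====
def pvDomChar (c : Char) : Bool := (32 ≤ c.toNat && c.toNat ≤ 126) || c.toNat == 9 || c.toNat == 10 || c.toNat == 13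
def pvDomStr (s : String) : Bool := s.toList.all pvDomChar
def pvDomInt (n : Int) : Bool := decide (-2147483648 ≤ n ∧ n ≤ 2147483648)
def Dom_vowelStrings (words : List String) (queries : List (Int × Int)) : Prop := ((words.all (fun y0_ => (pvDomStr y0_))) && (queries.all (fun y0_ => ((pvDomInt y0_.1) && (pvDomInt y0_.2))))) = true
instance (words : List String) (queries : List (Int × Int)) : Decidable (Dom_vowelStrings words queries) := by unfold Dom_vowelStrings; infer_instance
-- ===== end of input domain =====

-- B replaces A's running-sum accumulator loop by a 0/1 mask plus a prefix table of independent slice sums (alternative decomposition, not faster).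

-- shared helper: c in 'aeiou' (membership of a single character in the vowel string)
def pvIsVowel (c : Char) : Bool := ['a', 'e', 'i', 'o', 'u'].contains c

-- ===== PORT A =====
-- word[0] / word[-1] via Str.pyGet? (none = IndexError on the empty word; excluded by Pre_, default ⟨false⟩ unreachable there)
def vowelStrings (words : List String) (queries : List (Int × Int)) : List Int :=
  let st := words.foldl (fun (st : List Int × Int) w =>
      let sum_ : Int :=
        if ((PySem.Str.pyGet? w 0).elim false pvIsVowel)
            && ((PySem.Str.pyGet? w (-1)).elim false pvIsVowel) then st.2 + 1 else st.2
      (st.1 ++ [sum_], sum_)) ([0], 0)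
  queries.foldl (fun res lr =>
      res ++ [PySem.List.pyGetD st.1 (lr.2 + 1) 0 - PySem.List.pyGetD st.1 lr.1 0]) []

-- ===== PORT B =====
def vowelStrings_alt (words : List String) (queries : List (Int × Int)) : List Int :=
  let mask : List Int := words.map (fun w =>
      if ((PySem.Str.pyGet? w 0).elim false pvIsVowel)
          && ((PySem.Str.pyGet? w (-1)).elim false pvIsVowel) then 1 else 0)
  let pre := (PySem.List.pyRange 0 ((words.length : Int) + 1) 1).map
      (fun k => (PySem.List.slice mask none (some k)).sum)
  queries.map (fun lr =>
      PySem.List.pyGetD pre (lr.2 + 1) 0 - PySem.List.pyGetD pre lr.1 0)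

-- ===== PRECONDITION & SPEC =====
-- Pre_ excludes exactly the inputs where the Python A raises: an empty word (IndexError on
-- word[0]) and a query index outside the prefix array's Python index range [-(n+1), n].
def Pre_vowelStrings (words : List String) (queries : List (Int × Int)) : Prop :=
  (∀ w ∈ words, w.toList ≠ []) ∧
  ∀ p ∈ queries, -((words.length : Int) + 1) ≤ p.1 ∧ p.1 ≤ (words.length : Int) ∧
    -((words.length : Int) + 1) ≤ p.2 + 1 ∧ p.2 + 1 ≤ (words.length : Int)
instance (words : List String) (queries : List (Int × Int)) : Decidable (Pre_vowelStrings words queries) := by unfold Pre_vowelStrings; infer_instance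
def pvWitness_vowelStrings : List String × (List (Int × Int)) := (["au", "b", "e"], [(0, 1), (1, 2)])

def Spec_vowelStrings (words : List String) (queries : List (Int × Int)) (out : List Int) : Prop := out = vowelStrings_alt words queries
instance (words : List String) (queries : List (Int × Int)) (out : List Int) : Decidable (Spec_vowelStrings words queries out) := by unfold Spec_vowelStrings; infer_instance

-- ===== CLAIM (what is proved, stated in full; the proofs are below) =====
def Claim_equal_vowelStrings : Prop := ∀ (words : List String) (queries : List (Int × Int)), Dom_vowelStrings words queries → Pre_vowelStrings words queries → Spec_vowelStrings words queries (vowelStrings words queries)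

-- ===== LEMMAS AND PROOFS =====

-- the 0/1 contribution of one word (the common condition of both ports)
def pvBit (w : String) : Int :=
  if ((PySem.Str.pyGet? w 0).elim false pvIsVowel)
      && ((PySem.Str.pyGet? w (-1)).elim false pvIsVowel) then 1 else 0

-- the list A's first loop appends after the initial 0: running sums starting from s
def pvSums (s : Int) : List String → List Int
  | [] => []
  | w :: t => (s + pvBit w) :: pvSums (s + pvBit w) t

lemma pvSums_length (s : Int) (ws : List String) : (pvSums s ws).length = ws.length := by
  induction ws generalizing s with
  | nil => rfl
  | cons w t ih => simp [pvSums, ih]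

lemma pvFoldA (ws : List String) (acc : List Int) (s : Int) :
    (ws.foldl (fun (st : List Int × Int) w =>
      let sum_ : Int :=
        if ((PySem.Str.pyGet? w 0).elim false pvIsVowel)
            && ((PySem.Str.pyGet? w (-1)).elim false pvIsVowel) then st.2 + 1 else st.2
      (st.1 ++ [sum_], sum_)) (acc, s)).1 = acc ++ pvSums s ws := by
  induction ws generalizing acc s with
  | nil => simp [pvSums]
  | cons w t ih =>
      rw [List.foldl_cons]
      have hb : (if ((PySem.Str.pyGet? w 0).elim false pvIsVowel)
          && ((PySem.Str.pyGet? w (-1)).elim false pvIsVowel) then s + 1 else s) = s + pvBit w := by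
        unfold pvBit; split <;> simp
      show (List.foldl _ (acc ++ [if ((PySem.Str.pyGet? w 0).elim false pvIsVowel)
          && ((PySem.Str.pyGet? w (-1)).elim false pvIsVowel) then s + 1 else s],
          if ((PySem.Str.pyGet? w 0).elim false pvIsVowel)
          && ((PySem.Str.pyGet? w (-1)).elim false pvIsVowel) then s + 1 else s) t).1 =
        acc ++ pvSums s (w :: t)
      rw [hb, ih]
      simp [pvSums]

lemma pvSums_getD (ws : List String) (s : Int) (i : Nat) (hi : i < ws.length) :
    (pvSums s ws).getD i 0 = s + ((ws.map pvBit).take (i + 1)).sum := by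
  induction ws generalizing s i with
  | nil => simp at hi
  | cons w t ih =>
      cases i with
      | zero => simp [pvSums]
      | succ j =>
          have hj : j < t.length := by simpa using hi
          simp only [pvSums, List.getD_cons_succ, List.map_cons, List.take_succ_cons,
            List.sum_cons]
          rw [ih _ _ hj]; ring

-- the prefix list A builds equals the slice-sum table B builds
lemma pvPrefixList (ws : List String) :
    (0 : Int) :: pvSums 0 ws =
      (List.range (ws.length + 1)).map (fun k => ((ws.map pvBit).take k).sum) := by
  apply List.ext_getElem
  · simp [pvSums_length]
  · intro j h1 h2
    simp only [List.getElem_map, List.getElem_range]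
    cases j with
    | zero => simp
    | succ i =>
        have hi : i < ws.length := by
          simp only [List.length_cons, pvSums_length] at h1; omega
        have hsum : (pvSums 0 ws).getD i 0 = 0 + ((ws.map pvBit).take (i + 1)).sum :=
          pvSums_getD ws 0 i hi
        rw [List.getD_eq_getElem] at hsum
        · simp only [List.getElem_cons_succ]
          rw [hsum]; ring
        · rw [pvSums_length]; exact hi

theorem vowelStrings_spec : Claim_equal_vowelStrings := by
  intro words queries _ _
  unfold Spec_vowelStrings vowelStrings vowelStrings_alt
  rw [PySem.List.foldl_append_singleton_eq_map]
  have hpref : (words.foldl (fun (st : List Int × Int) w =>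
      let sum_ : Int :=
        if ((PySem.Str.pyGet? w 0).elim false pvIsVowel)
            && ((PySem.Str.pyGet? w (-1)).elim false pvIsVowel) then st.2 + 1 else st.2
      (st.1 ++ [sum_], sum_)) ([0], 0)).1 = (0 : Int) :: pvSums 0 words := by
    simpa using pvFoldA words [0] 0
  rw [hpref]
  have hmask : (words.map (fun w =>
      if ((PySem.Str.pyGet? w 0).elim false pvIsVowel)
          && ((PySem.Str.pyGet? w (-1)).elim false pvIsVowel) then (1 : Int) else 0)) =
      words.map pvBit := rfl
  rw [hmask]
  have hcast : ((words.length : Int) + 1) = ((words.length + 1 : Nat) : Int) := by push_cast; ring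
  have hB : (PySem.List.pyRange 0 ((words.length : Int) + 1) 1).map
      (fun k => (PySem.List.slice (words.map pvBit) none (some k)).sum) =
      (List.range (words.length + 1)).map (fun k => ((words.map pvBit).take k).sum) := by
    rw [hcast, PySem.List.pyRange_zero_nat, List.map_map]
    refine List.map_congr_left ?_
    intro k _
    simp only [Function.comp_apply, PySem.List.slice_to_natCast]
  dsimp only
  rw [hB, ← pvPrefixList]
  simp
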